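-- pv_equiv track=rewrite | github.com/qizwiz/rule30-ski-research | prize3/find_witnesses.py | find_witness
-- ===== SOURCE A (Python) =====
-- def rule30Local(p, q, r):
--     return p ^ (q or r)
--
-- def caStep(cells):
--     result = []
--     for i in range(len(cells) - 2):
--         result.append(rule30Local(cells[i], cells[i+1], cells[i+2]))
--     return result
--
-- def caEvolve(n, cells):
--     for _ in range(n):
--         cells = caStep(cells)
--     return cells
--
-- def rule30n(n, cells):
--     result = caEvolve(n, list(cells))
--     return result[0] if result else False
--
-- def configOfMask(n, mask):
--     num_cells = 2 * n + 1
--     return [(mask >> i) & 1 == 1 for i in range(num_cells)]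
--
-- def flipCell(cells, k):
--     c = list(cells)
--     c[k] = not c[k]
--     return c
--
-- def find_witness(n, k):
--     num_cells = 2 * n + 1
--     for mask in range(2 ** num_cells):
--         c = configOfMask(n, mask)
--         c_flip = flipCell(c, k)
--         if rule30n(n, c) != rule30n(n, c_flip):
--             return mask
--     return None
-- ===== SOURCE B (Python) =====
-- def find_witness(n, k):
--     num_cells = 2 * n + 1
--     def out_bit(x):
--         w = num_cells
--         for _ in range(n):
--             x = (x ^ ((x >> 1) | (x >> 2))) & ((1 << (w - 2)) - 1)
--             w -= 2
--         return x & 1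
--     for mask in range(1 << num_cells):
--         if out_bit(mask) != out_bit(mask ^ (1 << k)):
--             return mask
--     return None
-- ===== Notes on version B (the rewrite author's own statement) =====
-- stated objective: faster
-- what changed: Configurations are integer bitmasks instead of Bool lists: the per-cell caStep loop with list building is replaced by one parallel bitwise step (x ^ ((x>>1)|(x>>2))) masked to the shrinking width, and cell k is flipped by xor with 1<<k instead of copying and mutating a list.
-- outside the precondition, e.g. on find_witness(1, -1): A returns 0, B raises ValueError
import Mathlib
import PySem

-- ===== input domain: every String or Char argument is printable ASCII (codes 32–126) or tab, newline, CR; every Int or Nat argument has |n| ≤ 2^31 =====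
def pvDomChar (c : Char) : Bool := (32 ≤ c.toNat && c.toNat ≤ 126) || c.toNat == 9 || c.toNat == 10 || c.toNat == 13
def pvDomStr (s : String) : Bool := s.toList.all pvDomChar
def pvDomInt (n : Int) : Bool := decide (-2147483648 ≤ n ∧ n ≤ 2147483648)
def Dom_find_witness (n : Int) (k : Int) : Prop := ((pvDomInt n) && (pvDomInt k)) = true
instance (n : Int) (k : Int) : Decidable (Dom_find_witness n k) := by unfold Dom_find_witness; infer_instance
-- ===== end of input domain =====

-- B replaces the Bool-list cellular automaton with an integer-bitmask one: a whole
-- Rule-30 row step is one bitwise expression instead of a per-cell loop, and the cell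
-- flip is one xor instead of a list copy-and-mutate (objective: faster, constant-factor).

-- ===== PORT A =====
def rule30Local (p q r : Bool) : Bool := xor p (q || r)

-- cells[i], cells[i+1], cells[i+2] are always in range (i < len - 2), so getD is exact
def caStep (cells : List Bool) : List Bool :=
  (List.range (cells.length - 2)).foldl
    (fun result i =>
      result ++ [rule30Local (cells.getD i false) (cells.getD (i+1) false) (cells.getD (i+2) false)])
    []

def caEvolve (n : Int) (cells : List Bool) : List Bool :=
  (List.range n.toNat).foldl (fun c _ => caStep c) cells

def rule30n (n : Int) (cells : List Bool) : Bool :=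
  match caEvolve n cells with
  | [] => false
  | x :: _ => x

def configOfMask (n : Int) (mask : Int) : List Bool :=
  (List.range (2*n+1).toNat).map (fun (i : Nat) => PySem.Int.band (mask >>> i) 1 == 1)

-- exact for 0 ≤ k < len (guaranteed by Pre_); Python wraps negative k and raises out of range
def flipCell (cells : List Bool) (k : Int) : List Bool :=
  cells.set k.toNat (! cells.getD k.toNat false)

-- 'for mask in range(2**num_cells)' with early return, ported as count-up recursion on the
-- number of remaining masks (range is lazy in Python, so the list is never materialized)
def findLoopA (n : Int) (k : Int) (mask : Int) : Nat → Option Int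
  | 0 => none
  | fuel+1 =>
      let c := configOfMask n mask
      let cflip := flipCell c k
      if rule30n n c != rule30n n cflip then some mask else findLoopA n k (mask+1) fuel

-- 2 ** num_cells ported with a Nat exponent: exact for n ≥ 0 (Pre_); Python raises TypeError for n < 0
def find_witness (n : Int) (k : Int) : Option Int :=
  findLoopA n k 0 ((2:Nat) ^ (2*n+1).toNat)

-- ===== PORT B =====
-- one whole-row Rule-30 step on a bitmask row of width w
def bStep (x : Nat) (w : Nat) : Nat :=
  (x ^^^ ((x >>> 1) ||| (x >>> 2))) &&& ((1 <<< (w - 2)) - 1)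

def outBit (n : Int) (numCells : Nat) (x : Nat) : Nat :=
  ((List.range n.toNat).foldl (fun (st : Nat × Nat) _ => (bStep st.1 st.2, st.2 - 2)) (x, numCells)).1 &&& 1

-- the same lazy 'for mask in range(1 << num_cells)' as count-up recursion, masks as Nat
def findLoopB (n : Int) (k : Int) (numCells : Nat) (m : Nat) : Nat → Option Int
  | 0 => none
  | fuel+1 =>
      if outBit n numCells m != outBit n numCells (m ^^^ (1 <<< k.toNat)) then some (m : Int)
      else findLoopB n k numCells (m+1) fuel

-- num_cells and the masks kept as Nat: exact for n ≥ 0, 0 ≤ k (Pre_); Python B raises for k < 0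
def find_witness_alt (n : Int) (k : Int) : Option Int :=
  let numCells := (2*n+1).toNat
  findLoopB n k numCells 0 (1 <<< numCells)

-- ===== PRECONDITION & SPEC =====
-- Pre_ excludes n < 0 (A raises TypeError on range(2**n_negative)) and k outside [0, 2n+1):
-- for k < -(2n+1) or k ≥ 2n+1 A raises IndexError; for -(2n+1) ≤ k < 0 A returns via
-- Python's negative-index wraparound while B itself raises ValueError on 1 << k.
def Pre_find_witness (n : Int) (k : Int) : Prop := 0 ≤ n ∧ 0 ≤ k ∧ k < 2*n+1
instance (n : Int) (k : Int) : Decidable (Pre_find_witness n k) := by unfold Pre_find_witness; infer_instance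
def pvWitness_find_witness : Int × Int := (1, 0)

def Spec_find_witness (n : Int) (k : Int) (out : Option Int) : Prop := out = find_witness_alt n k
instance (n : Int) (k : Int) (out : Option Int) : Decidable (Spec_find_witness n k out) := by unfold Spec_find_witness; infer_instance

-- ===== CLAIM (what is proved, stated in full; the proofs are below) =====
def Claim_equal_find_witness : Prop := ∀ (n : Int) (k : Int), Dom_find_witness n k → Pre_find_witness n k → Spec_find_witness n k (find_witness n k)

-- ===== LEMMAS AND PROOFS =====

-- the width-w bit configuration of a mask, as A's Bool list
def cfg (w : Nat) (x : Nat) : List Bool := (List.range w).map x.testBit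

theorem bitlem (a : Nat) (i : Nat) : (PySem.Int.band ((a:Int) >>> i) 1 == 1) = a.testBit i := by
  have h : ((a:Int) >>> i) = ((a >>> i : Nat) : Int) := by simp
  have h2 : (1:Int) = ((1:Nat):Int) := rfl
  rw [h, h2, PySem.Int.band_natCast, Nat.and_one_is_mod, Nat.shiftRight_eq_div_pow,
      Nat.testBit_eq_decide_div_mod_eq]
  generalize a / 2^i % 2 = b
  by_cases hb : b = 1 <;> simp [hb]

theorem cfg_configOfMask (n : Int) (m : Nat) :
    configOfMask n (m : Int) = cfg (2*n+1).toNat m := by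
  unfold configOfMask cfg
  exact List.map_congr_left (fun i _ => bitlem m i)

theorem cfg_getD (w x i : Nat) (h : i < w) : (cfg w x).getD i false = x.testBit i := by
  unfold cfg
  rw [List.getD_eq_getElem?_getD]
  simp [h]

theorem caStep_cfg (w x : Nat) : caStep (cfg w x) = cfg (w - 2) (bStep x w) := by
  unfold caStep
  rw [PySem.List.foldl_append_singleton_eq_map]
  have hlen : (cfg w x).length = w := by simp [cfg]
  rw [hlen]
  apply List.ext_getElem
  · simp [cfg]
  · intro i h1 h2
    have hi : i < w - 2 := by simpa [cfg] using h2
    simp only [cfg, List.nil_append, List.getElem_map, List.getElem_range]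
    rw [PySem.List.getD_map_range _ w i _ (by omega), PySem.List.getD_map_range _ w (i+1) _ (by omega),
        PySem.List.getD_map_range _ w (i+2) _ (by omega)]
    unfold bStep rule30Local
    rw [Nat.one_shiftLeft, Nat.testBit_and, Nat.testBit_two_pow_sub_one, Nat.testBit_xor,
        Nat.testBit_or, Nat.testBit_shiftRight, Nat.testBit_shiftRight]
    simp [hi, Nat.add_comm]

theorem flipCell_cfg (w x : Nat) (k : Int) (_hk0 : 0 ≤ k) (hk : k.toNat < w) :
    flipCell (cfg w x) k = cfg w (x ^^^ (1 <<< k.toNat)) := by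
  unfold flipCell
  rw [cfg_getD w x k.toNat hk]
  apply List.ext_getElem
  · simp [cfg]
  · intro i h1 h2
    have hiw : i < w := by simpa [cfg] using h2
    rw [List.getElem_set]
    simp only [cfg, List.getElem_map, List.getElem_range]
    rw [Nat.one_shiftLeft, Nat.testBit_xor, Nat.testBit_two_pow]
    by_cases he : k.toNat = i <;> simp [he]

theorem fold_snd (j x w : Nat) :
    ((List.range j).foldl (fun (st : Nat × Nat) _ => (bStep st.1 st.2, st.2 - 2)) (x, w)).2 = w - 2*j := by
  induction j generalizing x w with
  | zero => simp
  | succ j ih =>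
      rw [List.range_succ, List.foldl_append]
      simp only [List.foldl_cons, List.foldl_nil]
      rw [ih]
      omega

theorem evolve_cfg (j x w : Nat) :
    (List.range j).foldl (fun c _ => caStep c) (cfg w x)
      = cfg (w - 2*j)
          (((List.range j).foldl (fun (st : Nat × Nat) _ => (bStep st.1 st.2, st.2 - 2)) (x, w)).1) := by
  induction j generalizing x w with
  | zero => simp
  | succ j ih =>
      rw [List.range_succ, List.foldl_append, List.foldl_append]
      simp only [List.foldl_cons, List.foldl_nil]
      rw [ih, caStep_cfg, fold_snd]
      congr 1

theorem rule30n_outBit (n : Int) (hn : 0 ≤ n) (x : Nat) :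
    (if rule30n n (cfg (2*n+1).toNat x) then 1 else 0) = outBit n (2*n+1).toNat x := by
  unfold rule30n caEvolve outBit
  rw [evolve_cfg]
  have h1 : (2*n+1).toNat - 2*n.toNat = 1 := by omega
  rw [h1]
  generalize ((List.range n.toNat).foldl (fun (st : Nat × Nat) _ => (bStep st.1 st.2, st.2 - 2)) (x, (2*n+1).toNat)).1 = X
  have : cfg 1 X = [X.testBit 0] := by simp [cfg]
  rw [this, Nat.and_one_is_mod]
  rcases hb : X.testBit 0 <;> simp [hb] <;>
    (rw [Nat.testBit_eq_decide_div_mod_eq] at hb; simp at hb; omega)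

theorem pred_eq (n k : Int) (hn : 0 ≤ n) (hk : 0 ≤ k) (hk2 : k < 2*n+1) (m : Nat) :
    (rule30n n (configOfMask n (m:Int)) != rule30n n (flipCell (configOfMask n (m:Int)) k))
      = (outBit n (2*n+1).toNat m != outBit n (2*n+1).toNat (m ^^^ (1 <<< k.toNat))) := by
  rw [cfg_configOfMask, flipCell_cfg _ _ _ hk (by omega)]
  have h1 := rule30n_outBit n hn m
  have h2 := rule30n_outBit n hn (m ^^^ (1 <<< k.toNat))
  rcases hb1 : rule30n n (cfg (2*n+1).toNat m) <;>
    rcases hb2 : rule30n n (cfg (2*n+1).toNat (m ^^^ (1 <<< k.toNat))) <;>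
    rw [hb1] at h1 <;> rw [hb2] at h2 <;> rw [← h1, ← h2] <;> simp

theorem loop_eq (n k : Int) (hn : 0 ≤ n) (hk : 0 ≤ k) (hk2 : k < 2*n+1) (fuel : Nat) :
    ∀ (m : Nat), findLoopA n k (m : Int) fuel = findLoopB n k (2*n+1).toNat m fuel := by
  induction fuel with
  | zero => intro m; rfl
  | succ fuel ih =>
      intro m
      unfold findLoopA findLoopB
      show (if (rule30n n (configOfMask n (m:Int)) != rule30n n (flipCell (configOfMask n (m:Int)) k)) = true
              then some ((m:Nat) : Int) else findLoopA n k ((m:Int)+1) fuel)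
            = _
      rw [pred_eq n k hn hk hk2 m]
      have hc : ((m:Int)+1) = ((m+1 : Nat) : Int) := by push_cast; ring
      rw [hc, ih (m+1)]

-- ===== VERDICT (by name: the statement is the Claim_ definition above) =====
theorem find_witness_spec : Claim_equal_find_witness := by
  intro n k _ hpre
  obtain ⟨hn, hk, hk2⟩ := hpre
  unfold Spec_find_witness find_witness find_witness_alt
  have h2 : ((2:Nat) ^ (2*n+1).toNat) = (1 <<< (2*n+1).toNat : Nat) := by
    simp [Nat.one_shiftLeft]
  have h0 : (0 : Int) = ((0 : Nat) : Int) := rfl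
  rw [h2, h0, loop_eq n k hn hk hk2 _ 0]
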